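-- pv_equiv track=rewrite | github.com/senyayukhnev/m80-112B-23_Arseniy_Yukhnev_LMS | 2.4_labs/test20.py | best_opportunity
-- ===== SOURCE A (Python) =====
-- def convert(num10: int, sistema: int):
--     k = 1
--     num = 1
--     ans = 0
--     a = []
--     while k <= num10:
--         k = k * sistema
--     k = k // sistema
--     while k != 0:
--         while num10 >= k:
--             num10 -= k
--             num += 1
--         a.append(num)
--         num = 0
--         k = k // sistema
--     for i in range(len(a)):
--         ans += a[i]
--     return ans
--
-- def best_opportunity(num10: int):
--     ans = 0
--     maximum = 0
--     for i in range(2, 11):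
--         if convert(num10, i) > maximum:
--             maximum = convert(num10, i)
--             ans = i
--     return ans
-- ===== SOURCE B (Python) =====
-- def _digitsum(num10, base):
--     s = 0
--     while num10 > 0:
--         num10, d = divmod(num10, base)
--         s += d
--     return s
--
--
-- def best_opportunity(num10: int):
--     if num10 < 1:
--         return 0
--     return max(range(2, 11), key=lambda base: _digitsum(num10, base))
-- ===== Notes on version B (the rewrite author's own statement) =====
-- stated objective: simpler
-- what changed: A extracts digits by growing a power with a multiply loop and then repeated subtraction per digit, summing a list and tracking the maximum with an explicit accumulator; B computes the digit sum with a single divmod loop and picks the best base with max(range(2,11), key=digitsum), returning 0 for num10 < 1 as A does.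
import Mathlib
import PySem

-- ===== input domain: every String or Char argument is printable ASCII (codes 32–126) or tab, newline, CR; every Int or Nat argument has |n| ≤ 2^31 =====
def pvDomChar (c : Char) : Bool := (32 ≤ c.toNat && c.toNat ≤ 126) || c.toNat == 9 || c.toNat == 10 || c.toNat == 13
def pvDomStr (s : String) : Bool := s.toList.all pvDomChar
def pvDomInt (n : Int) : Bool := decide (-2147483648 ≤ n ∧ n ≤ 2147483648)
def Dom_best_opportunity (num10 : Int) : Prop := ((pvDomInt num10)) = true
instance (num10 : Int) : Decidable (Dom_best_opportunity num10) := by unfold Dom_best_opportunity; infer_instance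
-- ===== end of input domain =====

-- B replaces A's hand-rolled repeated-subtraction digit extraction and explicit max accumulator
-- by a divmod digit-sum helper and max(range(2,11), key=digitsum); objective: simpler.

-- ===== PORT A =====
-- 'while k <= num10: k = k * sistema'.  The '2 ≤ sistema ∧ 1 ≤ k' conjuncts are totality
-- guards only: every call site has sistema ∈ [2,10] and k starting at 1.
def growK (num10 sistema k : Int) : Int :=
  if h : 2 ≤ sistema ∧ 1 ≤ k ∧ k ≤ num10 then growK num10 sistema (k * sistema) else k
termination_by (num10 + 1 - k).toNat
decreasing_by
  obtain ⟨hs, hk, hkn⟩ := h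
  have : k + 1 ≤ k * sistema := by nlinarith
  omega

-- 'while num10 >= k: num10 -= k; num += 1'.  '1 ≤ k' is a totality guard (holds at call sites).
def innerSub (num10 num k : Int) : Int × Int :=
  if h : 1 ≤ k ∧ k ≤ num10 then innerSub (num10 - k) (num + 1) k else (num10, num)
termination_by num10.toNat
decreasing_by omega

-- 'while k != 0: … ; a.append(num); num = 0; k = k // sistema'.
-- '1 ≤ k ∧ 2 ≤ sistema' are totality guards (at call sites k is a nonneg power and sistema ≥ 2).
def loop2 (num10 num k sistema : Int) (a : List Int) : List Int :=
  if h : k ≠ 0 ∧ 1 ≤ k ∧ 2 ≤ sistema then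
    let p := innerSub num10 num k
    loop2 p.1 0 (PySem.Int.floordiv k sistema) sistema (a ++ [p.2])
  else a
termination_by k.toNat
decreasing_by
  obtain ⟨_, hk, hs⟩ := h
  rw [PySem.Int.floordiv_eq_ediv_of_pos (by omega)]
  have h1 : k / sistema < k := by
    apply Int.ediv_lt_of_lt_mul (by omega)
    nlinarith
  have h2 : 0 ≤ k / sistema := Int.ediv_nonneg (by omega) (by omega)
  omega

def convert (num10 sistema : Int) : Int :=
  let k0 := growK num10 sistema 1
  let k1 := PySem.Int.floordiv k0 sistema
  let a := loop2 num10 1 k1 sistema []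
  -- 'for i in range(len(a)): ans += a[i]'
  (PySem.List.pyRange 0 (PySem.List.len a) 1).foldl
    (fun ans i => ans + PySem.List.pyGetD a i 0) 0

def best_opportunity (num10 : Int) : Int :=
  ((PySem.List.pyRange 2 11 1).foldl
    (fun (st : Int × Int) i =>
      if convert num10 i > st.2 then (i, convert num10 i) else st)
    (0, 0)).1

-- ===== PORT B =====
-- 'while num10 > 0: num10, d = divmod(num10, base); s += d' (divmod ported as floordiv/mod;
-- '1 < base' is a totality guard: every call site has base ∈ [2,10]).
def digitsum (num10 base : Int) : Int :=
  if h : 0 < num10 ∧ 1 < base then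
    PySem.Int.mod num10 base + digitsum (PySem.Int.floordiv num10 base) base
  else 0
termination_by num10.toNat
decreasing_by
  obtain ⟨hn, hb⟩ := h
  rw [PySem.Int.floordiv_eq_ediv_of_pos (by omega)]
  have h1 : num10 / base < num10 := by
    apply Int.ediv_lt_of_lt_mul (by omega)
    nlinarith
  have h2 : 0 ≤ num10 / base := Int.ediv_nonneg (by omega) (by omega)
  omega

-- 'max(range(2, 11), key=…)' ; Python max raises only on an empty iterable, which this range
-- never is, so the 'none' branch of max? is unreachable.
def best_opportunity_alt (num10 : Int) : Int :=
  if num10 < 1 then 0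
  else
    match PySem.List.max? (PySem.List.pyRange 2 11 1) (fun base => digitsum num10 base) with
    | some b => b
    | none => 0

-- ===== PRECONDITION & SPEC =====
def Spec_best_opportunity (num10 : Int) (out : Int) : Prop := out = best_opportunity_alt num10
instance (num10 : Int) (out : Int) : Decidable (Spec_best_opportunity num10 out) := by unfold Spec_best_opportunity; infer_instance

-- ===== CLAIM (what is proved, stated in full; the proofs are below) =====
def Claim_equal_best_opportunity : Prop := ∀ (num10 : Int), Dom_best_opportunity num10 → Spec_best_opportunity num10 (best_opportunity num10)

-- ===== LEMMAS AND PROOFS =====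

theorem digitsum_nonneg (n b : Int) : 0 ≤ digitsum n b := by
  fun_induction digitsum with
  | case1 m h ih =>
    have hm : 0 ≤ PySem.Int.mod m b := by
      rw [PySem.Int.mod_eq_emod_of_pos (by omega)]
      exact Int.emod_nonneg _ (by omega)
    omega
  | case2 => simp

-- unconditional one-step unfolding for nonnegative n (at n = 0 both sides are 0)
theorem digitsum_step (n b : Int) (hn : 0 ≤ n) (hb : 2 ≤ b) :
    digitsum n b = n % b + digitsum (n / b) b := by
  rcases eq_or_lt_of_le hn with h0 | h0
  · rw [← h0]
    simp [digitsum]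
  · rw [digitsum, dif_pos ⟨h0, by omega⟩,
        PySem.Int.mod_eq_emod_of_pos (by omega),
        PySem.Int.floordiv_eq_ediv_of_pos (by omega)]

theorem digitsum_small (d b : Int) (h0 : 0 ≤ d) (hd : d < b) (hb : 2 ≤ b) :
    digitsum d b = d := by
  rw [digitsum_step d b h0 hb, Int.emod_eq_of_lt h0 hd, Int.ediv_eq_zero_of_lt h0 hd]
  rw [digitsum]
  norm_num

-- peeling the TOP digit off the digit sum: for n < s^(m+2),
-- digitsum n s = n / s^(m+1) + digitsum (n % s^(m+1)) s
theorem digitsum_top (s : Int) (hs : 2 ≤ s) :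
    ∀ (m : Nat) (n : Int), 0 ≤ n → n < s ^ (m + 2) →
      digitsum n s = n / s ^ (m + 1) + digitsum (n % s ^ (m + 1)) s := by
  intro m
  induction m with
  | zero =>
    intro n hn hlt
    have hsp : (0:Int) < s := by omega
    have hq0 : 0 ≤ n / s := Int.ediv_nonneg hn (by omega)
    have hqs : n / s < s := by
      rw [Int.ediv_lt_iff_lt_mul hsp]
      calc n < s ^ 2 := hlt
        _ = s * s := by ring
    rw [digitsum_step n s hn hs, digitsum_small (n / s) s hq0 hqs hs, pow_one,
        digitsum_small (n % s) s (Int.emod_nonneg _ (by omega)) (Int.emod_lt_of_pos _ hsp) hs]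
    omega
  | succ m ih =>
    intro n hn hlt
    have hsp : (0:Int) < s := by omega
    have hpow : (0:Int) < s ^ (m + 1) := pow_pos hsp _
    have hq0 : 0 ≤ n / s := Int.ediv_nonneg hn (by omega)
    have hqlt : n / s < s ^ (m + 2) := by
      rw [Int.ediv_lt_iff_lt_mul hsp]
      calc n < s ^ (m + 1 + 2) := hlt
        _ = s ^ (m + 2) * s := by ring
    have hr0 : 0 ≤ n % s ^ (m + 2) := Int.emod_nonneg _ (by positivity)
    have hrlt : n % s ^ (m + 2) < s ^ (m + 2) := Int.emod_lt_of_pos _ (by positivity)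
    -- r := n % s^(m+2): r % s = n % s and r / s = (n / s) % s^(m+1)
    have hmul : s ^ (m + 2) = s * s ^ (m + 1) := by ring
    have hrm : n % s ^ (m + 2) % s = n % s := by
      exact Int.emod_emod_of_dvd n ⟨s ^ (m + 1), hmul⟩
    have hrd : n % s ^ (m + 2) / s = n / s % s ^ (m + 1) := by
      rw [hmul, Int.emod_def, Int.sub_ediv_of_dvd _ (Dvd.dvd.mul_right ⟨s ^ (m + 1), rfl⟩ _),
          Int.mul_assoc, Int.mul_ediv_cancel_left _ (by omega : s ≠ 0),
          ← Int.ediv_ediv_of_nonneg (le_of_lt hsp), Int.emod_def]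
    have hdd : n / s / s ^ (m + 1) = n / s ^ (m + 2) := by
      rw [Int.ediv_ediv_of_nonneg (le_of_lt hsp), ← hmul]
    rw [digitsum_step n s hn hs, ih (n / s) hq0 hqlt,
        digitsum_step (n % s ^ (m + 2)) s hr0 hs, hrm, hrd, hdd]
    have hix : s ^ (m + 1 + 1) = s ^ (m + 2) := by ring
    rw [hix]
    omega

-- the repeated-subtraction loop is division with remainder
theorem innerSub_eq (k : Int) (hk : 1 ≤ k) :
    ∀ (num10 num : Int), 0 ≤ num10 →
      innerSub num10 num k = (num10 % k, num + num10 / k) := by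
  intro num10
  induction hn : num10.toNat using Nat.strong_induction_on generalizing num10 with
  | _ t ih =>
    intro num h0
    by_cases hge : k ≤ num10
    · rw [innerSub, dif_pos ⟨hk, hge⟩]
      have hdec : (num10 - k).toNat < t := by omega
      rw [ih _ hdec (num10 - k) rfl (num + 1) (by omega)]
      have hmod : (num10 - k) % k = num10 % k := Int.sub_emod_right num10 k
      have hdiv : (num10 - k) / k = num10 / k - 1 := by
        rw [Int.sub_ediv_of_dvd _ (dvd_refl k), Int.ediv_self (by omega)]
      rw [hmod, hdiv]
      ring_nf
    · rw [innerSub, dif_neg (by omega)]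
      rw [Int.emod_eq_of_lt h0 (by omega), Int.ediv_eq_zero_of_lt h0 (by omega)]
      norm_num

-- the outer loop of convert, started at k = s^m with num10 < s^(m+1), appends digits whose
-- sum is num + digitsum num10 s
theorem loop2_sum (s : Int) (hs : 2 ≤ s) :
    ∀ (m : Nat) (num10 num : Int) (a : List Int), 0 ≤ num10 → num10 < s ^ (m + 1) →
      (loop2 num10 num (s ^ m) s a).foldl (· + ·) 0 =
        a.foldl (· + ·) 0 + num + digitsum num10 s := by
  intro m
  induction m with
  | zero =>
    intro num10 num a h0 hlt
    rw [loop2, dif_pos ⟨by norm_num, by norm_num, hs⟩]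
    rw [pow_zero] at *
    rw [innerSub_eq 1 le_rfl num10 num h0]
    have : PySem.Int.floordiv 1 s = 0 := by
      rw [PySem.Int.floordiv_eq_ediv_of_pos (by omega)]
      exact Int.ediv_eq_zero_of_lt (by norm_num) (by omega)
    rw [this, loop2, dif_neg (by simp)]
    rw [List.foldl_append]
    simp only [Int.ediv_one, List.foldl_cons, List.foldl_nil]
    rw [digitsum_small num10 s h0 (by simpa using hlt) hs]
    ring
  | succ m ih =>
    intro num10 num a h0 hlt
    have hsp : (0:Int) < s := by omega
    have hpow : (0:Int) < s ^ (m + 1) := pow_pos hsp _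
    rw [loop2, dif_pos ⟨by omega, by omega, hs⟩]
    rw [innerSub_eq _ (by omega) num10 num h0]
    have hfd : PySem.Int.floordiv (s ^ (m + 1)) s = s ^ m := by
      rw [PySem.Int.floordiv_eq_ediv_of_pos (by omega), pow_succ,
          Int.mul_ediv_cancel _ (by omega)]
    have hr0 : 0 ≤ num10 % s ^ (m + 1) := Int.emod_nonneg _ (by positivity)
    have hrlt : num10 % s ^ (m + 1) < s ^ (m + 1) := Int.emod_lt_of_pos _ hpow
    rw [hfd, ih (num10 % s ^ (m + 1)) 0 (a ++ [num + num10 / s ^ (m + 1)]) hr0 hrlt]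
    rw [List.foldl_append]
    simp only [List.foldl_cons, List.foldl_nil]
    rw [digitsum_top s hs m num10 h0 hlt]
    omega

-- growK returns k·s^j for the least j with k·s^j > num10
theorem growK_spec (num10 s : Int) (hs : 2 ≤ s) :
    ∀ (k : Int), 1 ≤ k →
      ∃ j : Nat, growK num10 s k = k * s ^ j ∧ num10 < k * s ^ j ∧
        (j = 0 ∨ k * s ^ j ≤ num10 * s) := by
  intro k hk
  induction hm : (num10 + 1 - k).toNat using Nat.strong_induction_on generalizing k with
  | _ t ih =>
    by_cases hle : k ≤ num10
    · have hk1 : 1 ≤ k * s := by nlinarith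
      have hks : k + 1 ≤ k * s := by nlinarith
      have hdec : (num10 + 1 - k * s).toNat < t := by omega
      obtain ⟨j, h1, h2, h3⟩ := ih _ hdec (k * s) hk1 rfl
      refine ⟨j + 1, ?_, ?_, Or.inr ?_⟩
      · rw [growK, dif_pos ⟨hs, hk, hle⟩, h1]; ring
      · calc num10 < k * s * s ^ j := h2
          _ = k * s ^ (j + 1) := by ring
      · rcases h3 with h3 | h3
        · subst h3
          have : k * s ^ (0 + 1) = k * s := by ring
          rw [this]
          nlinarith
        · calc k * s ^ (j + 1) = k * s * s ^ j := by ring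
            _ ≤ num10 * s := h3
    · refine ⟨0, ?_, ?_, Or.inl rfl⟩
      · rw [growK, dif_neg (by omega)]; ring
      · have : k * s ^ (0:Nat) = k := by ring
        omega

-- convert computes the base-s digit sum plus one (the stray 'num = 1' initialisation)
theorem convert_eq (num10 s : Int) (hs : 2 ≤ s) (hn : 1 ≤ num10) :
    convert num10 s = digitsum num10 s + 1 := by
  obtain ⟨j, h1, h2, h3⟩ := growK_spec num10 s hs 1 le_rfl
  simp only [one_mul] at h1 h2 h3
  rcases h3 with h3 | h3
  · subst h3; simp at h2; omega
  · obtain ⟨m, rfl⟩ : ∃ m, j = m + 1 := by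
      rcases j with _ | m
      · exfalso; simp at h2; omega
      · exact ⟨m, rfl⟩
    have hfd : PySem.Int.floordiv (s ^ (m + 1)) s = s ^ m := by
      rw [PySem.Int.floordiv_eq_ediv_of_pos (by omega), pow_succ,
          Int.mul_ediv_cancel _ (by omega)]
    simp only [convert]
    rw [h1, hfd]
    rw [PySem.List.foldl_pyRange_zero_pyGetD (loop2 num10 1 (s ^ m) s []) 0
          (fun ans x => ans + x) 0]
    have h5 := loop2_sum s hs m num10 1 [] (by omega) h2
    simp only [List.foldl_nil] at h5
    omega

-- for num10 < 1 every convert is 0 (growK never runs, k becomes 1 // s = 0)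
theorem convert_zero (num10 s : Int) (hs : 2 ≤ s) (hn : num10 < 1) :
    convert num10 s = 0 := by
  simp only [convert]
  rw [growK, dif_neg (by omega)]
  have : PySem.Int.floordiv 1 s = 0 := by
    rw [PySem.Int.floordiv_eq_ediv_of_pos (by omega)]
    exact Int.ediv_eq_zero_of_lt (by norm_num) (by omega)
  rw [this, loop2, dif_neg (by simp)]
  simp

-- once both folds are aligned (A holds (best, convert best), B's max? scan holds some best)
-- they stay aligned
theorem sel_aligned (num10 : Int) (hn : 1 ≤ num10) :
    ∀ (l : List Int) (m : Int), 2 ≤ m → (∀ b ∈ l, 2 ≤ b) →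
      (l.foldl
        (fun (st : Int × Int) i =>
          if convert num10 i > st.2 then (i, convert num10 i) else st)
        (m, convert num10 m)).1 =
      (match PySem.List.max? (m :: l) (fun base => digitsum num10 base) with
       | some b => b
       | none => 0) := by
  intro l
  induction l with
  | nil => intro m _ _; simp [PySem.List.max?]
  | cons b t ih =>
    intro m hm hall
    have hb : 2 ≤ b := hall b List.mem_cons_self
    have hrest : ∀ x ∈ t, 2 ≤ x := fun x hx => hall x (List.mem_cons_of_mem _ hx)
    have hstep : PySem.List.max? (m :: b :: t) (fun base => digitsum num10 base) =
        PySem.List.max? ((if digitsum num10 m < digitsum num10 b then b else m) :: t)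
          (fun base => digitsum num10 base) := by
      simp only [PySem.List.max?, List.foldl_cons]
      congr 1
      split_ifs <;> rfl
    rw [hstep]
    simp only [List.foldl_cons]
    rw [convert_eq num10 b hb hn, convert_eq num10 m hm hn]
    by_cases hc : digitsum num10 m < digitsum num10 b
    · rw [if_pos hc, if_pos (by simpa using by omega : digitsum num10 b + 1 > (m, digitsum num10 m + 1).2),
          ← convert_eq num10 b hb hn]
      exact ih b hb hrest
    · rw [if_neg hc, if_neg (by simpa using by omega : ¬ (digitsum num10 b + 1 > (m, digitsum num10 m + 1).2)),
          ← convert_eq num10 m hm hn]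
      exact ih m hm hrest

-- with num10 < 1 the accumulator (0, 0) never changes
theorem fold_zero (num10 : Int) (hn : num10 < 1) :
    ∀ (l : List Int), (∀ b ∈ l, 2 ≤ b) →
      (l.foldl
        (fun (st : Int × Int) i =>
          if convert num10 i > st.2 then (i, convert num10 i) else st)
        (0, 0)).1 = 0 := by
  intro l
  induction l with
  | nil => intro _; rfl
  | cons b t ih =>
    intro hall
    simp only [List.foldl_cons]
    rw [convert_zero num10 b (hall b List.mem_cons_self) hn, if_neg (by norm_num)]
    exact ih (fun x hx => hall x (List.mem_cons_of_mem _ hx))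

-- ===== VERDICT (by name: the statement is the Claim_ definition above) =====
theorem best_opportunity_spec : Claim_equal_best_opportunity := by
  intro num10 _
  unfold Spec_best_opportunity best_opportunity best_opportunity_alt
  by_cases hn : num10 < 1
  · rw [if_pos hn]
    exact fold_zero num10 hn _ (fun b hb => by
      rw [PySem.List.mem_pyRange_one] at hb; omega)
  · rw [if_neg hn]
    have hrange : PySem.List.pyRange 2 11 1 = 2 :: PySem.List.pyRange 3 11 1 :=
      PySem.List.pyRange_one_cons (by norm_num)
    rw [hrange]
    simp only [List.foldl_cons]
    have hpos : convert num10 2 > ((0:Int), (0:Int)).2 := by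
      have h2 := convert_eq num10 2 (by norm_num) (by omega)
      have h3 := digitsum_nonneg num10 2
      simp only []
      omega
    rw [if_pos hpos]
    exact sel_aligned num10 (by omega) (PySem.List.pyRange 3 11 1) 2 (by norm_num)
      (fun b hb => by rw [PySem.List.mem_pyRange_one] at hb; omega)
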